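-- pv_equiv track=rewrite | github.com/acm-uofsc/codeathon-s23-upper | brick-and-mortar-mapping/mkin.py | same_distance
-- ===== SOURCE A (Python) =====
-- def same_distance(customers, stores, x, y):
--     ops = [(1, 1), (1, -1), (-1, 1), (-1, -1)]
--     for customer in customers:
--         cx, cy = customer
--         dx = abs(x - cx)
--         dy = abs(y - cy)
--         perms = [(cx + op[0] * dx, cy + op[1] * dy) for op in ops]
--         swapped_perms = [(cx + op[0] * dy, cy + op[1] * dx) for op in ops]
--         perms = perms + swapped_perms
--         for perm in perms:
--             if perm in customers:
--                 return True
--     return False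
-- ===== SOURCE B (Python) =====
-- def same_distance(customers, stores, x, y):
--     for (c1x, c1y) in customers:
--         dx = abs(x - c1x)
--         dy = abs(y - c1y)
--         for (c2x, c2y) in customers:
--             ax = abs(c2x - c1x)
--             ay = abs(c2y - c1y)
--             if (ax == dx and ay == dy) or (ax == dy and ay == dx):
--                 return True
--     return False
-- ===== Notes on version B (the rewrite author's own statement) =====
-- stated objective: simpler
-- what changed: B replaces A's construction of eight candidate points per customer plus list-membership tests with a direct pairwise scan testing an absolute-difference predicate between two customers, never materializing candidate lists.
import Mathlib
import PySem

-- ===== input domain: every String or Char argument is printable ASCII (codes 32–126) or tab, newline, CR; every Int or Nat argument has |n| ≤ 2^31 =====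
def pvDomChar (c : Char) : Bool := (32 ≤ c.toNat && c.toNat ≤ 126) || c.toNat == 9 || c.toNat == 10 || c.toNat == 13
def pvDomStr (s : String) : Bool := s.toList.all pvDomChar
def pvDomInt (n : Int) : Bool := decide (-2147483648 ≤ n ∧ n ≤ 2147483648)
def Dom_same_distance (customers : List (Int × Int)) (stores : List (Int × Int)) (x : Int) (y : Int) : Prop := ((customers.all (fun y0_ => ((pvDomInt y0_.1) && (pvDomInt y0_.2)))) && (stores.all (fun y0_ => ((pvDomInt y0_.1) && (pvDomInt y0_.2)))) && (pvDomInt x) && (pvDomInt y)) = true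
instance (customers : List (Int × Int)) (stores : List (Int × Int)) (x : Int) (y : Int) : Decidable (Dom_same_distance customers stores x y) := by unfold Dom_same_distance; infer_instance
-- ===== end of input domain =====

-- B replaces A's 8-candidate-point construction and membership tests with a direct
-- pairwise absolute-difference predicate (objective: simpler; same return value everywhere).
-- ===== PORT A =====
def sdLoop (customers : List (Int × Int)) (x y : Int) : List (Int × Int) → Bool
  | [] => false
  | customer :: rest =>
    let cx := customer.1
    let cy := customer.2
    let dx := |x - cx|
    let dy := |y - cy|
    let ops : List (Int × Int) := [(1, 1), (1, -1), (-1, 1), (-1, -1)]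
    let perms := ops.map (fun op => (cx + op.1 * dx, cy + op.2 * dy))
    let swapped_perms := ops.map (fun op => (cx + op.1 * dy, cy + op.2 * dx))
    let allPerms := perms ++ swapped_perms
    if allPerms.any (fun perm => customers.contains perm) then true
    else sdLoop customers x y rest

def same_distance (customers : List (Int × Int)) (stores : List (Int × Int)) (x : Int) (y : Int) : Bool :=
  sdLoop customers x y customers

-- ===== PORT B =====
def same_distance_alt (customers : List (Int × Int)) (stores : List (Int × Int)) (x : Int) (y : Int) : Bool :=
  customers.any (fun c1 =>
    let dx := |x - c1.1|
    let dy := |y - c1.2|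
    customers.any (fun c2 =>
      let ax := |c2.1 - c1.1|
      let ay := |c2.2 - c1.2|
      (ax == dx && ay == dy) || (ax == dy && ay == dx)))

-- ===== PRECONDITION & SPEC =====
def Spec_same_distance (customers : List (Int × Int)) (stores : List (Int × Int)) (x : Int) (y : Int) (out : Bool) : Prop := out = same_distance_alt customers stores x y
instance (customers : List (Int × Int)) (stores : List (Int × Int)) (x : Int) (y : Int) (out : Bool) : Decidable (Spec_same_distance customers stores x y out) := by unfold Spec_same_distance; infer_instance

-- ===== CLAIM (what is proved, stated in full; the proofs are below) =====
def Claim_equal_same_distance : Prop := ∀ (customers : List (Int × Int)) (stores : List (Int × Int)) (x : Int) (y : Int), Dom_same_distance customers stores x y → Spec_same_distance customers stores x y (same_distance customers stores x y)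

-- ===== LEMMAS AND PROOFS =====

-- The eight candidate points of A characterize exactly the pairs satisfying B's predicate.
lemma pv_pair_char (cx cy d1 d2 px py : Int) (h1 : 0 ≤ d1) (h2 : 0 ≤ d2) :
    ((px, py) = (cx + 1 * d1, cy + 1 * d2) ∨ (px, py) = (cx + 1 * d1, cy + -1 * d2) ∨
     (px, py) = (cx + -1 * d1, cy + 1 * d2) ∨ (px, py) = (cx + -1 * d1, cy + -1 * d2) ∨
     (px, py) = (cx + 1 * d2, cy + 1 * d1) ∨ (px, py) = (cx + 1 * d2, cy + -1 * d1) ∨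
     (px, py) = (cx + -1 * d2, cy + 1 * d1) ∨ (px, py) = (cx + -1 * d2, cy + -1 * d1)) ↔
    ((|px - cx| = d1 ∧ |py - cy| = d2) ∨ (|px - cx| = d2 ∧ |py - cy| = d1)) := by
  simp only [Prod.mk.injEq]
  rcases abs_cases (px - cx) with ⟨e1, _⟩ | ⟨e1, _⟩ <;>
    rcases abs_cases (py - cy) with ⟨e2, _⟩ | ⟨e2, _⟩ <;> rw [e1, e2] <;> omega

lemma pv_inner_eq (customers : List (Int × Int)) (x y cx cy : Int) :
    (((([(1, 1), (1, -1), (-1, 1), (-1, -1)] : List (Int × Int)).map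
        (fun op => (cx + op.1 * |x - cx|, cy + op.2 * |y - cy|))) ++
      (([(1, 1), (1, -1), (-1, 1), (-1, -1)] : List (Int × Int)).map
        (fun op => (cx + op.1 * |y - cy|, cy + op.2 * |x - cx|)))).any
      (fun perm => customers.contains perm))
    = customers.any (fun c2 =>
        (|c2.1 - cx| == |x - cx| && |c2.2 - cy| == |y - cy|) ||
        (|c2.1 - cx| == |y - cy| && |c2.2 - cy| == |x - cx|)) := by
  rw [Bool.eq_iff_iff]
  simp only [List.any_eq_true, List.contains_eq_mem, decide_eq_true_eq]
  constructor
  · rintro ⟨p, hp, hc⟩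
    refine ⟨p, hc, ?_⟩
    obtain ⟨px, py⟩ := p
    simp only [List.map, List.mem_append, List.mem_cons, List.not_mem_nil, or_false] at hp
    have h := (pv_pair_char cx cy |x - cx| |y - cy| px py (abs_nonneg _) (abs_nonneg _)).mp (by tauto)
    simpa using h
  · rintro ⟨c2, hm, hpred⟩
    obtain ⟨px, py⟩ := c2
    have h := (pv_pair_char cx cy |x - cx| |y - cy| px py (abs_nonneg _) (abs_nonneg _)).mpr
      (by simpa using hpred)
    refine ⟨(px, py), ?_, hm⟩
    simp only [List.map, List.mem_append, List.mem_cons, List.not_mem_nil, or_false]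
    tauto

lemma pv_sdLoop_eq (customers : List (Int × Int)) (x y : Int) (cs : List (Int × Int)) :
    sdLoop customers x y cs = cs.any (fun c1 =>
      let dx := |x - c1.1|
      let dy := |y - c1.2|
      customers.any (fun c2 =>
        let ax := |c2.1 - c1.1|
        let ay := |c2.2 - c1.2|
        (ax == dx && ay == dy) || (ax == dy && ay == dx))) := by
  induction cs with
  | nil => rfl
  | cons c rest ih =>
    show (if _ then true else sdLoop customers x y rest) = _
    rw [List.any_cons, pv_inner_eq customers x y c.1 c.2, ih]
    cases h : customers.any _ <;> simp

theorem same_distance_spec : Claim_equal_same_distance := by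
  intro customers stores x y _
  unfold Spec_same_distance same_distance same_distance_alt
  exact pv_sdLoop_eq customers x y customers
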